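-- pv_equiv track=rewrite | github.com/adilido99/introCompSec | task5/main.py | create_chunk
-- ===== SOURCE A (Python) =====
-- def create_chunk(text):
--     chunks = []
--     for i in range(4):
--         j = i
--         mini_text = ""
--         while j < len(text):
--             mini_text += text[j]
--             j += 4
--         chunks.append(mini_text)
--     return chunks
-- ===== SOURCE B (Python) =====
-- def create_chunk(text):
--     buckets = [[], [], [], []]
--     for i, ch in enumerate(text):
--         buckets[i % 4].append(ch)
--     return ["".join(b) for b in buckets]
-- ===== Notes on version B (the rewrite author's own statement) =====
-- stated objective: faster
-- what changed: Replaces A's four strided scans (with quadratic string concatenation) by a single enumerate pass distributing each character into one of four list buckets, joined once at the end.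
import Mathlib
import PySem

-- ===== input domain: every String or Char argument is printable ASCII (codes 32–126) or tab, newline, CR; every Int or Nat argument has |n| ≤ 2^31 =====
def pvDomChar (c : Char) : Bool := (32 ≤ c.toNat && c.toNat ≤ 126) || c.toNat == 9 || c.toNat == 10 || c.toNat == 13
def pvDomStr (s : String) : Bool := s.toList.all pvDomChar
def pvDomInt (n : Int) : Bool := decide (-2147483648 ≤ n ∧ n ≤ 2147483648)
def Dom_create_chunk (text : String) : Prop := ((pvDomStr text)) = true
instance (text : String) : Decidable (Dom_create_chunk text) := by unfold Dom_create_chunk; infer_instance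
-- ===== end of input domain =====

-- B makes one linear pass distributing characters into 4 buckets instead of A's four strided scans with string concatenation (objective: faster, constant-factor).

-- ===== PORT A =====
-- the inner 'while j < len(text): mini_text += text[j]; j += 4' loop
def pvWhileA (l : List Char) (j : Nat) (acc : List Char) : List Char :=
  if h : j < l.length then pvWhileA l (j + 4) (acc ++ [l[j]]) else acc
  termination_by l.length - j
  decreasing_by omega

def create_chunk (text : String) : List String :=
  (List.range 4).foldl (fun chunks i => chunks ++ [String.mk (pvWhileA text.toList i [])]) []

-- ===== PORT B =====
-- 'for i, ch in enumerate(text): buckets[i % 4].append(ch)'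
def pvStepB (bs : List (List Char)) (p : Char × Nat) : List (List Char) :=
  bs.modify (p.2 % 4) (· ++ [p.1])

def create_chunk_alt (text : String) : List String :=
  ((text.toList.zipIdx).foldl pvStepB [[], [], [], []]).map String.mk

-- ===== PRECONDITION & SPEC =====
def Spec_create_chunk (text : String) (out : List String) : Prop := out = create_chunk_alt text
instance (text : String) (out : List String) : Decidable (Spec_create_chunk text out) := by unfold Spec_create_chunk; infer_instance

-- ===== CLAIM (what is proved, stated in full; the proofs are below) =====
def Claim_equal_create_chunk : Prop := ∀ (text : String), Dom_create_chunk text → Spec_create_chunk text (create_chunk text)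

-- ===== LEMMAS AND PROOFS =====

-- elements of l at positions p (counting global index from c) with (c+p) % 4 = k
def pvSel (l : List Char) (c k : Nat) : List Char :=
  match l with
  | [] => []
  | a :: t => if c % 4 = k then a :: pvSel t (c + 1) k else pvSel t (c + 1) k

-- every 4th element starting with the head
def pvEvery4 (l : List Char) : List Char :=
  match l with
  | [] => []
  | a :: t => a :: pvEvery4 (t.drop 3)
  termination_by l.length
  decreasing_by simp

lemma pvEvery4_nil : pvEvery4 [] = [] := by rw [pvEvery4.eq_def]

lemma pvEvery4_cons (a : Char) (t : List Char) :
    pvEvery4 (a :: t) = a :: pvEvery4 (t.drop 3) := by rw [pvEvery4.eq_def]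

lemma pvWhileA_fuel (n : Nat) : ∀ (l : List Char) (j : Nat) (acc : List Char),
    l.length ≤ j + n → pvWhileA l j acc = acc ++ pvEvery4 (l.drop j) := by
  induction n with
  | zero =>
      intro l j acc hle
      rw [pvWhileA, dif_neg (by omega), List.drop_eq_nil_of_le (by omega), pvEvery4_nil,
        List.append_nil]
  | succ n ih =>
      intro l j acc hle
      by_cases h : j < l.length
      · rw [pvWhileA, dif_pos h, ih l (j + 4) _ (by omega)]
        have hd : l.drop j = l[j] :: l.drop (j + 1) := List.drop_eq_getElem_cons h
        rw [hd, pvEvery4_cons, List.drop_drop, List.append_assoc]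
        rfl
      · rw [pvWhileA, dif_neg h, List.drop_eq_nil_of_le (by omega), pvEvery4_nil,
          List.append_nil]

lemma pvWhileA_eq (l : List Char) (j : Nat) (acc : List Char) :
    pvWhileA l j acc = acc ++ pvEvery4 (l.drop j) :=
  pvWhileA_fuel l.length l j acc (by omega)

lemma pvSel_eq (l : List Char) (c k : Nat) (hk : k < 4) :
    pvSel l c k = pvEvery4 (l.drop ((k + 4 - c % 4) % 4)) := by
  induction l generalizing c with
  | nil => simp [pvSel, List.drop_nil, pvEvery4_nil]
  | cons a t ih =>
      have hc : c % 4 < 4 := Nat.mod_lt _ (by omega)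
      have hc1 : (c + 1) % 4 = (c % 4 + 1) % 4 := by omega
      rw [pvSel]
      by_cases h : c % 4 = k
      · rw [if_pos h, ih (c + 1)]
        have h1 : (k + 4 - (c + 1) % 4) % 4 = 3 := by omega
        have h2 : (k + 4 - c % 4) % 4 = 0 := by omega
        rw [h1, h2, List.drop_zero, pvEvery4_cons]
      · rw [if_neg h, ih (c + 1)]
        have hd : (k + 4 - c % 4) % 4 = (k + 4 - (c + 1) % 4) % 4 + 1 := by omega
        rw [hd, List.drop_succ_cons]

lemma pvFoldB (l : List Char) (c : Nat) (b0 b1 b2 b3 : List Char) :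
    (l.zipIdx c).foldl pvStepB [b0, b1, b2, b3] =
      [b0 ++ pvSel l c 0, b1 ++ pvSel l c 1, b2 ++ pvSel l c 2, b3 ++ pvSel l c 3] := by
  induction l generalizing c b0 b1 b2 b3 with
  | nil => simp [pvSel]
  | cons a t ih =>
      rw [List.zipIdx_cons, List.foldl_cons]
      have hc : c % 4 < 4 := Nat.mod_lt _ (by omega)
      have : c % 4 = 0 ∨ c % 4 = 1 ∨ c % 4 = 2 ∨ c % 4 = 3 := by omega
      rcases this with h | h | h | h
      · rw [show pvStepB [b0, b1, b2, b3] (a, c) = [b0 ++ [a], b1, b2, b3] by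
          simp only [pvStepB, h]; rfl, ih]
        simp [pvSel, h, List.append_assoc]
      · rw [show pvStepB [b0, b1, b2, b3] (a, c) = [b0, b1 ++ [a], b2, b3] by
          simp only [pvStepB, h]; rfl, ih]
        simp [pvSel, h, List.append_assoc]
      · rw [show pvStepB [b0, b1, b2, b3] (a, c) = [b0, b1, b2 ++ [a], b3] by
          simp only [pvStepB, h]; rfl, ih]
        simp [pvSel, h, List.append_assoc]
      · rw [show pvStepB [b0, b1, b2, b3] (a, c) = [b0, b1, b2, b3 ++ [a]] by
          simp only [pvStepB, h]; rfl, ih]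
        simp [pvSel, h, List.append_assoc]

-- ===== VERDICT (by name: the statement is the Claim_ definition above) =====
theorem create_chunk_spec : Claim_equal_create_chunk := by
  intro text _
  unfold Spec_create_chunk create_chunk create_chunk_alt
  rw [show text.toList.zipIdx = text.toList.zipIdx 0 from rfl, pvFoldB]
  simp only [List.range_succ, List.range_zero, List.nil_append, List.map_cons, List.map_nil]
  rw [pvSel_eq _ _ _ (by omega), pvSel_eq _ _ _ (by omega), pvSel_eq _ _ _ (by omega),
    pvSel_eq _ _ _ (by omega)]
  simp [pvWhileA_eq]
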